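-- pv_equiv track=rewrite | github.com/sbroboticsteam/robocup-rescue-23 | offset_classes.py | modify_first_integer
-- ===== SOURCE A (Python) =====
-- def modify_first_integer(line, amount):
--     # Find the position of the first integer in the line
--     first_digit_pos = None
--     for i, char in enumerate(line):
--         if char.isdigit():
--             first_digit_pos = i
--             break
--     if first_digit_pos is None:
--         return line  # No integer found, return the original line
--
--     # Extract the first integer and add the amount to it
--     first_integer = ""
--     for j in range(first_digit_pos, len(line)):
--         if line[j].isdigit():
--             first_integer += line[j]
--         else:
--             break
--     new_first_integer = int(first_integer) + amount
--
--     # Replace the first integer in the line with the new value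
--     new_line = line[:first_digit_pos] + str(new_first_integer) + line[first_digit_pos+len(first_integer):]
--     return new_line
-- ===== SOURCE B (Python) =====
-- def modify_first_integer(line, amount):
--     # One right-to-left pass. While scanning backwards, maintain the span [start, end)
--     # and the decimal value of the digit run currently being read, using place-value
--     # accumulation (value += digit * place); whenever a run further left begins, it
--     # overwrites the one held, so after the scan the run held is the FIRST run of the
--     # string. No forward scans, no substring extraction, no int().
--     start = end = -1
--     value = place = 0
--     for i in range(len(line) - 1, -1, -1):
--         ch = line[i]
--         if ch.isdigit():
--             d = ord(ch) - 48
--             if start == i + 1:              # extends the run just to its right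
--                 value += d * place
--             else:                           # a new, more leftward run begins
--                 end, value, place = i + 1, d, 1
--             start = i
--             place *= 10
--     if end < 0:
--         return line                         # no integer found
--     return line[:start] + str(value + amount) + line[end:]
-- ===== Notes on version B (the rewrite author's own statement) =====
-- stated objective: alternative
-- what changed: Replaces A's two forward scans plus substring building and int() by a single right-to-left pass that maintains the span and place-value-accumulated value of the digit run currently being read, so the run held when the scan ends is the first run of the string; no int(), no digit-substring extraction.
import Mathlib
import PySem

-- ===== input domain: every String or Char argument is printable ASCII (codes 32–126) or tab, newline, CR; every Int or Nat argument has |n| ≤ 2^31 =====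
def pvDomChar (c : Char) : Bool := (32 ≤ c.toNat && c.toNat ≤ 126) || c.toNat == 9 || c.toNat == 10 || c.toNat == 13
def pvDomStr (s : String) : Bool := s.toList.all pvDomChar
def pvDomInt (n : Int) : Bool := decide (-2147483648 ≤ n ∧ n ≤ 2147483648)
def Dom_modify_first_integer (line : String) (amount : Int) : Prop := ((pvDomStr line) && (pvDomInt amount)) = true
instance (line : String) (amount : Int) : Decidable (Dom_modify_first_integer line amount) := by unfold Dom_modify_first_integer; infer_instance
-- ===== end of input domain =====

-- B replaces A's two forward scans (find the first digit, grow the digit substring, int() it)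
-- by ONE right-to-left pass that tracks the span and place-value of the digit run being read,
-- so that the run left over at the end is the first one; return values agree, no side effects.

-- ===== PORT A =====
-- the 'for i, char in enumerate(line): if char.isdigit(): … break' loop
def pvA_findPos : List (Int × Char) → Option Int
  | [] => none
  | (i, c) :: rest => if PySem.Chars.isdigit c then some i else pvA_findPos rest

-- the 'for j in range(first_digit_pos, len(line)): if line[j].isdigit(): acc += line[j] else: break'
-- loop, transcribed over the suffix line[first_digit_pos:] it walks
def pvA_collect : List Char → List Char
  | [] => []
  | c :: rest => if PySem.Chars.isdigit c then c :: pvA_collect rest else []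

-- int(first_integer): first_integer is by construction a nonempty run of ASCII digits
-- '0'-'9' (pvA_collect keeps exactly such characters), and on those int() is exactly
-- this decimal left fold (exact here)
def pvA_intVal (ds : List Char) : Int :=
  ds.foldl (fun a c => a * 10 + ((c.toNat : Int) - 48)) 0

def modify_first_integer (line : String) (amount : Int) : String :=
  match pvA_findPos (PySem.List.enumerate line.toList) with
  | none => line  -- No integer found, return the original line
  | some p =>
    -- first_integer = the collected digit run; new_first_integer = int(first_integer) + amount;
    -- line[:p] + str(new_first_integer) + line[p+len(first_integer):]  (nonnegative in-range slices)
    String.ofList (line.toList.take p.toNat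
      ++ PySem.Int.toChars (pvA_intVal (pvA_collect (line.toList.drop p.toNat)) + amount)
      ++ line.toList.drop (p.toNat + (pvA_collect (line.toList.drop p.toNat)).length))

-- ===== PORT B =====
-- one step of B's backward loop body on the state (start, end, value, place)
def pvB_step (ic : Int × Char) (st : Int × Int × Int × Int) : Int × Int × Int × Int :=
  if PySem.Chars.isdigit ic.2 then
    let d : Int := ((ic.2.toNat : Int) - 48)
    if st.1 = ic.1 + 1 then
      (ic.1, st.2.1, st.2.2.1 + d * st.2.2.2, st.2.2.2 * 10)  -- extend run, then place *= 10
    else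
      (ic.1, ic.1 + 1, d, 10)                                 -- new run (place = 1, then *= 10)
  else st

def modify_first_integer_alt (line : String) (amount : Int) : String :=
  -- 'for i in range(len(line)-1, -1, -1)' visits the indexed characters right to left:
  -- it is the right fold of the loop body over enumerate(line); st = (start, end, value, place)
  match (PySem.List.enumerate line.toList).foldr pvB_step (-1, -1, 0, 0) with
  | (start, e, value, _) =>
    if e < 0 then line  -- no integer found
    else
      -- line[:start] + str(value + amount) + line[end:]  with 0 ≤ start ≤ end ≤ len: exact as take/drop
      String.ofList (line.toList.take start.toNat ++ PySem.Int.toChars (value + amount)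
                 ++ line.toList.drop e.toNat)

-- ===== PRECONDITION & SPEC =====
def Spec_modify_first_integer (line : String) (amount : Int) (out : String) : Prop := out = modify_first_integer_alt line amount
instance (line : String) (amount : Int) (out : String) : Decidable (Spec_modify_first_integer line amount out) := by unfold Spec_modify_first_integer; infer_instance

-- ===== CLAIM (what is proved, stated in full; the proofs are below) =====
def Claim_equal_modify_first_integer : Prop := ∀ (line : String) (amount : Int), Dom_modify_first_integer line amount → Spec_modify_first_integer line amount (modify_first_integer line amount)

-- ===== LEMMAS AND PROOFS =====

-- A's first loop finds exactly the length of the non-digit prefix (shifted by the enumerate start)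
theorem pvA_findPos_enumerate (cs : List Char) (s : Int) :
    pvA_findPos (PySem.List.enumerate cs s) =
      if cs.dropWhile (fun c => !(PySem.Chars.isdigit c)) = [] then none
      else some (s + (cs.takeWhile (fun c => !(PySem.Chars.isdigit c))).length) := by
  induction cs generalizing s with
  | nil => simp [pvA_findPos, PySem.List.enumerate_nil]
  | cons c rest ih =>
    rw [PySem.List.enumerate_cons]
    by_cases h : PySem.Chars.isdigit c
    · simp [pvA_findPos, h]
    · simp only [pvA_findPos, h, ih, List.dropWhile_cons, List.takeWhile_cons,
        Bool.not_eq_true']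
      simp
      split_ifs with h2
      · rfl
      · congr 1; ring

-- A's second loop is takeWhile isdigit
theorem pvA_collect_eq (cs : List Char) :
    pvA_collect cs = cs.takeWhile (fun c => PySem.Chars.isdigit c) := by
  induction cs with
  | nil => rfl
  | cons c rest ih =>
    by_cases h : PySem.Chars.isdigit c <;> simp [pvA_collect, h, ih]

-- starting the decimal fold from a shifts the result by a * 10^len
theorem pvA_intVal_from (ds : List Char) (a : Int) :
    ds.foldl (fun a c => a * 10 + ((c.toNat : Int) - 48)) a =
      a * 10 ^ ds.length + pvA_intVal ds := by
  induction ds generalizing a with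
  | nil => simp [pvA_intVal]
  | cons c rest ih =>
    show List.foldl _ (a * 10 + ((c.toNat : Int) - 48)) rest = _
    rw [ih]
    have h2 : pvA_intVal (c :: rest)
        = ((0 : Int) * 10 + ((c.toNat : Int) - 48)) * 10 ^ rest.length + pvA_intVal rest := by
      show List.foldl _ ((0 : Int) * 10 + ((c.toNat : Int) - 48)) rest = _
      rw [ih]
    rw [h2, List.length_cons, pow_succ]
    ring

theorem pvA_intVal_cons (c : Char) (ds : List Char) :
    pvA_intVal (c :: ds) = ((c.toNat : Int) - 48) * 10 ^ ds.length + pvA_intVal ds := by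
  show List.foldl (fun a c => a * 10 + ((c.toNat : Int) - 48))
      ((0 : Int) * 10 + ((c.toNat : Int) - 48)) ds = _
  rw [pvA_intVal_from]
  ring

-- characterization of B's backward fold: it ends holding the FIRST digit run of cs
-- (span shifted by the enumerate start s, value by place-value accumulation)
theorem pvB_foldr_char (cs : List Char) (s : Int) (hs : 0 ≤ s) :
    (PySem.List.enumerate cs s).foldr pvB_step (-1, -1, 0, 0) =
      if cs.dropWhile (fun c => !(PySem.Chars.isdigit c)) = [] then (-1, -1, 0, 0)
      else
        (s + ((cs.takeWhile (fun c => !(PySem.Chars.isdigit c))).length : Int),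
         s + ((cs.takeWhile (fun c => !(PySem.Chars.isdigit c))).length : Int)
           + (((cs.dropWhile (fun c => !(PySem.Chars.isdigit c))).takeWhile
               (fun c => PySem.Chars.isdigit c)).length : Int),
         pvA_intVal ((cs.dropWhile (fun c => !(PySem.Chars.isdigit c))).takeWhile
               (fun c => PySem.Chars.isdigit c)),
         (10 : Int) ^ ((cs.dropWhile (fun c => !(PySem.Chars.isdigit c))).takeWhile
               (fun c => PySem.Chars.isdigit c)).length) := by
  induction cs generalizing s with
  | nil => simp [PySem.List.enumerate_nil]
  | cons c rest ih =>
    rw [PySem.List.enumerate_cons, List.foldr_cons, ih (s + 1) (by omega)]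
    by_cases hd : PySem.Chars.isdigit c
    · by_cases hrest : rest.dropWhile (fun c => !(PySem.Chars.isdigit c)) = []
      · -- no digit in the tail: the fold starts a fresh one-digit run at s
        have hall : ∀ x ∈ rest, ¬ (PySem.Chars.isdigit x) := by
          intro x hx
          have := List.dropWhile_eq_nil_iff.mp hrest x hx
          simpa using this
        have htw : rest.takeWhile (fun c => PySem.Chars.isdigit c) = [] := by
          cases rest with
          | nil => rfl
          | cons r rs =>
            have : ¬ (PySem.Chars.isdigit r) := hall r (by simp)
            simp [List.takeWhile_cons, this]
        simp only [hrest, if_true, pvB_step, hd, if_true]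
        have hne : (-1 : Int) ≠ s + 1 := by omega
        simp [List.dropWhile_cons, List.takeWhile_cons, hd, hne, htw, pvA_intVal]
      · obtain ⟨c', rest', rfl⟩ : ∃ c' rest', rest = c' :: rest' := by
          cases rest with
          | nil => simp at hrest
          | cons a b => exact ⟨a, b, rfl⟩
        by_cases hd' : PySem.Chars.isdigit c'
        · -- the tail starts with a digit: the held run starts at s+1 and is extended
          have hdw : (c' :: rest').dropWhile (fun c => !(PySem.Chars.isdigit c)) = c' :: rest' := by
            simp [List.dropWhile_cons, hd']
          have htw : (c' :: rest').takeWhile (fun c => !(PySem.Chars.isdigit c)) = [] := by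
            simp [List.takeWhile_cons, hd']
          have htw2 : (c :: c' :: rest').takeWhile (fun c => PySem.Chars.isdigit c)
              = c :: (c' :: rest').takeWhile (fun c => PySem.Chars.isdigit c) := by
            simp [List.takeWhile_cons, hd]
          simp only [hrest, if_false, hdw, htw, pvB_step, hd, if_true,
            List.dropWhile_cons, List.takeWhile_cons, Bool.not_eq_true', List.length_nil,
            Nat.cast_zero, add_zero]
          simp only [hd, if_pos rfl, reduceCtorEq, if_false, htw2, pvA_intVal_cons,
            List.length_cons]
          refine Prod.ext ?_ (Prod.ext ?_ (Prod.ext ?_ ?_)) <;>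
            simp [pvA_intVal_cons, pow_succ, hd, hd'] <;> push_cast <;> first | ring | rfl | omega
        · -- the tail's run (if any) starts later: a fresh one-digit run begins at s
          have htw1 : (c' :: rest').takeWhile (fun c => !(PySem.Chars.isdigit c))
              = c' :: rest'.takeWhile (fun c => !(PySem.Chars.isdigit c)) := by
            simp [List.takeWhile_cons, hd']
          simp only [hrest, if_false, htw1, pvB_step, hd, if_true]
          have hne : s + 1 + (((c' :: rest'.takeWhile (fun c => !(PySem.Chars.isdigit c))).length : Nat) : Int)
              ≠ s + 1 := by
            simp only [List.length_cons]
            push_cast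
            omega
          rw [if_neg hne]
          have h1 : (c :: c' :: rest').dropWhile (fun c => !(PySem.Chars.isdigit c))
              = c :: c' :: rest' := by simp [List.dropWhile_cons, hd]
          have h2 : (c :: c' :: rest').takeWhile (fun c => !(PySem.Chars.isdigit c)) = [] := by
            simp [List.takeWhile_cons, hd]
          have h3 : (c :: c' :: rest').takeWhile (fun c => PySem.Chars.isdigit c) = [c] := by
            simp [List.takeWhile_cons, hd, hd']
          simp [h1, h2, h3, pvA_intVal]
    · -- non-digit head: the step leaves the state unchanged, indices shift by one
      simp only [pvB_step, hd, Bool.false_eq_true, if_false]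
      have h1 : (c :: rest).dropWhile (fun c => !(PySem.Chars.isdigit c))
          = rest.dropWhile (fun c => !(PySem.Chars.isdigit c)) := by
        simp [List.dropWhile_cons, hd]
      have h2 : (c :: rest).takeWhile (fun c => !(PySem.Chars.isdigit c))
          = c :: rest.takeWhile (fun c => !(PySem.Chars.isdigit c)) := by
        simp [List.takeWhile_cons, hd]
      rw [h1, h2]
      split_ifs with h
      · rfl
      · refine Prod.ext (by push_cast [List.length_cons]; ring)
          (Prod.ext (by push_cast [List.length_cons]; ring) rfl)

-- ===== VERDICT (by name: the statement is the Claim_ definition above) =====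
theorem modify_first_integer_spec : Claim_equal_modify_first_integer := by
  intro line amount _
  unfold Spec_modify_first_integer modify_first_integer modify_first_integer_alt
  rw [pvA_findPos_enumerate, pvB_foldr_char _ 0 le_rfl]
  set cs := line.toList with hcs
  set p := fun c => !(PySem.Chars.isdigit c) with hp
  by_cases h : cs.dropWhile p = []
  · simp [h]
  · simp only [h, if_false]
    set ds := (cs.dropWhile p).takeWhile (fun c => PySem.Chars.isdigit c) with hds
    have hlen : ((0 : Int) + ((cs.takeWhile p).length : Int)).toNat = (cs.takeWhile p).length := by
      simp
    have hnonneg : ¬ ((0 : Int) + ((cs.takeWhile p).length : Int) + (ds.length : Int) < 0) := by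
      push_cast; omega
    simp only [hlen, if_neg hnonneg, pvA_collect_eq]
    have hdrop : cs.drop (cs.takeWhile p).length = cs.dropWhile p := by
      nth_rewrite 2 [← List.takeWhile_append_dropWhile (p := p) (l := cs)]
      rw [List.drop_left]
    have htake : cs.take (cs.takeWhile p).length = cs.takeWhile p := by
      nth_rewrite 2 [← List.takeWhile_append_dropWhile (p := p) (l := cs)]
      rw [List.take_left]
    have hend : ((0 : Int) + ((cs.takeWhile p).length : Int) + (ds.length : Int)).toNat
        = (cs.takeWhile p).length + ds.length := by
      push_cast; omega
    rw [hdrop, hend]
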